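-- pv_equiv track=rewrite | github.com/dfetch-org/dfetch | dfetch/commands/import_.py | _calculate_solution_score
-- ===== SOURCE A (Python) =====
-- from typing import List, Sequence, Set, Tuple
--
-- def _calculate_solution_score(
--     solution: Tuple[str, ...], projects_urls: Set[str]
-- ) -> int:
--     """Calculate a score with the given solution.
--
--     Args:
--         solution (Tuple[str, ...]): A set of remote urls
--         projects_urls (Set[str]): A set of projects urls
--
--     Returns:
--         int: Lower score is a better solution
--     """
--     # Less remotes, is better
--     score = len(solution)
--
--     # Shortest url for projects, is better
--     for url in projects_urls:
--         minimum = len(url)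
--         for remote in solution:
--             if url.startswith(remote):
--                 minimum = min(minimum, len(url) - len(remote))
--         score += minimum
--
--     return score
-- ===== SOURCE B (Python) =====
-- def _calculate_solution_score(solution, projects_urls):
--     # Sort remotes once by length descending; the first prefix match is then the longest.
--     remotes = sorted(solution, key=len, reverse=True)
--     score = len(solution)
--     for url in projects_urls:
--         score += len(url)
--         for remote in remotes:
--             if url.startswith(remote):
--                 score -= len(remote)
--                 break
--     return score
-- ===== Notes on version B (the rewrite author's own statement) =====
-- stated objective: alternative
-- what changed: B sorts the remotes once by length descending and, per url, takes the first prefix match with an early break, instead of A's full min-accumulating scan over all remotes for every url.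
import Mathlib
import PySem

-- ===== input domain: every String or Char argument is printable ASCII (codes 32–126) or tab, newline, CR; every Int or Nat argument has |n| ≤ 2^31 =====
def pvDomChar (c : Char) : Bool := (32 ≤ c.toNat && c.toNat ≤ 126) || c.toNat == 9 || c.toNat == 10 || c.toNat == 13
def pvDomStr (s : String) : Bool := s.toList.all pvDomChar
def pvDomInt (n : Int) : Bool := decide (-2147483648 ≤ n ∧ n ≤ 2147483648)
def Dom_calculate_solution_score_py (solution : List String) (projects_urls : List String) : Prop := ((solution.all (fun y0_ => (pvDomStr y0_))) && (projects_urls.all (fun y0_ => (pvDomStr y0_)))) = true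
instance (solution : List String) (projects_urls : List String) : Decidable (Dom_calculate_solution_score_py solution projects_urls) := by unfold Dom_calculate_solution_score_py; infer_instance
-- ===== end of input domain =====

-- B replaces A's per-url min-scan over all remotes by one length-descending sort of the
-- remotes plus a first-prefix-match scan with early break per url (objective: alternative).

-- ===== PORT A =====
def calculate_solution_score_py (solution : List String) (projects_urls : List String) : Int :=
  projects_urls.foldl
    (fun score url =>
      score +
        solution.foldl
          (fun minimum remote =>
            if PySem.Str.startswith url remote then
              min minimum (PySem.Str.len url - PySem.Str.len remote)
            else minimum)
          (PySem.Str.len url))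
    (PySem.List.len solution)

-- ===== PORT B =====
-- length of the first remote that is a prefix of url (0 if none): the 'break' of Source B
def pvFirstSub (url : String) : List String → Int
  | [] => 0
  | r :: t => if PySem.Str.startswith url r then PySem.Str.len r else pvFirstSub url t

def calculate_solution_score_py_alt (solution : List String) (projects_urls : List String) : Int :=
  let remotes := PySem.List.sorted solution (fun s => PySem.Str.len s) true
  projects_urls.foldl
    (fun score url => score + PySem.Str.len url - pvFirstSub url remotes)
    (PySem.List.len solution)

-- ===== PRECONDITION & SPEC =====
def Spec_calculate_solution_score_py (solution : List String) (projects_urls : List String) (out : Int) : Prop := out = calculate_solution_score_py_alt solution projects_urls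
instance (solution : List String) (projects_urls : List String) (out : Int) : Decidable (Spec_calculate_solution_score_py solution projects_urls out) := by unfold Spec_calculate_solution_score_py; infer_instance

-- ===== CLAIM (what is proved, stated in full; the proofs are below) =====
def Claim_equal_calculate_solution_score_py : Prop := ∀ (solution : List String) (projects_urls : List String), Dom_calculate_solution_score_py solution projects_urls → Spec_calculate_solution_score_py solution projects_urls (calculate_solution_score_py solution projects_urls)

-- ===== LEMMAS AND PROOFS =====

-- the running maximum of matching-prefix lengths (proof-side reformulation of A's inner loop)
def pvMaxPre (url : String) (a : Int) (l : List String) : Int :=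
  l.foldl (fun acc r => if PySem.Str.startswith url r then max acc (PySem.Str.len r) else acc) a

lemma pvLen_nonneg (s : String) : 0 ≤ PySem.Str.len s := by
  simp [PySem.Str.len_eq]

-- A's inner min-loop is len url minus the running max of matching prefix lengths
lemma innerA_eq (u : String) (l : List String) : ∀ a : Int,
    l.foldl (fun minimum remote =>
        if PySem.Str.startswith u remote then
          min minimum (PySem.Str.len u - PySem.Str.len remote)
        else minimum) (PySem.Str.len u - a)
      = PySem.Str.len u - pvMaxPre u a l := by
  induction l with
  | nil => intro a; simp [pvMaxPre]
  | cons r t ih =>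
      intro a
      simp only [List.foldl_cons, pvMaxPre]
      by_cases h : PySem.Str.startswith u r
      · simp only [h, if_true]
        rw [show min (PySem.Str.len u - a) (PySem.Str.len u - PySem.Str.len r)
              = PySem.Str.len u - max a (PySem.Str.len r) by omega]
        exact ih (max a (PySem.Str.len r))
      · simp only [h]
        exact ih a

-- the running max stays put once every remaining matching length is ≤ the accumulator
lemma pvMaxPre_stay (u : String) (t : List String) : ∀ a : Int,
    (∀ y ∈ t, PySem.Str.len y ≤ a) → pvMaxPre u a t = a := by
  induction t with
  | nil => intro a _; rfl
  | cons r t ih =>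
      intro a h
      simp only [pvMaxPre, List.foldl_cons]
      by_cases hr : PySem.Str.startswith u r
      · simp only [hr, if_true]
        rw [show max a (PySem.Str.len r) = a by
          have := h r (by simp); omega]
        exact ih a (fun y hy => h y (by simp [hy]))
      · simp only [hr]
        exact ih a (fun y hy => h y (by simp [hy]))

-- on a length-descending list, the running max from 0 is the first prefix match
lemma pvMaxPre_sorted (u : String) (s : List String)
    (h : s.Pairwise (fun x y => PySem.Str.len y ≤ PySem.Str.len x)) :
    pvMaxPre u 0 s = pvFirstSub u s := by
  induction s with
  | nil => rfl
  | cons r t ih =>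
      rcases List.pairwise_cons.mp h with ⟨hr, ht⟩
      by_cases hsw : PySem.Str.startswith u r
      · simp only [pvMaxPre, List.foldl_cons, pvFirstSub, hsw, if_true]
        rw [show max 0 (PySem.Str.len r) = PySem.Str.len r by
          have := pvLen_nonneg r; omega]
        exact pvMaxPre_stay u t (PySem.Str.len r) hr
      · simp only [pvMaxPre, List.foldl_cons, pvFirstSub, hsw]
        exact ih ht

-- the running max is invariant under permutation of the remotes
lemma pvMaxPre_perm (u : String) {l₁ l₂ : List String} (p : l₁.Perm l₂) (a : Int) :
    pvMaxPre u a l₁ = pvMaxPre u a l₂ := by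
  unfold pvMaxPre
  exact p.foldl_eq' (fun x _ y _ z => by
    cases hx : PySem.Str.startswith u x <;>
      cases hy : PySem.Str.startswith u y <;>
      simp only [hx, hy, if_true, Bool.false_eq_true, if_false] <;>
      first | rfl | exact max_right_comm z _ _) a

-- ===== VERDICT (by name: the statement is the Claim_ definition above) =====
theorem calculate_solution_score_py_spec : Claim_equal_calculate_solution_score_py := by
  intro solution projects_urls _
  unfold Spec_calculate_solution_score_py
  unfold calculate_solution_score_py calculate_solution_score_py_alt
  apply PySem.List.foldl_congr_mem
  intro score url _
  have hinner := innerA_eq url solution 0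
  rw [sub_zero] at hinner
  rw [hinner,
      pvMaxPre_perm url (PySem.List.sorted_perm solution (fun s => PySem.Str.len s) true).symm 0,
      pvMaxPre_sorted url _
        (PySem.List.sorted_pairwise_rev solution (fun s => PySem.Str.len s))]
  omega
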